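-- pv_equiv track=rewrite | github.com/mboultoureau/advent-of-code | 2024/day14/script.py | is_probably_easter_eggs
-- ===== SOURCE A (Python) =====
-- def is_probably_easter_eggs(robots, width, height):
--     # Check if there is a 5x5 square with one robot minimum per cell
--     plan = [[0 for _ in range(width)] for _ in range(height)]
--     for robot in robots:
--         plan[robot[1]][robot[0]] += 1
--
--     for r in range(height - 4):
--         for c in range(width - 4):
--             count = 0
--             for i in range(5):
--                 for j in range(5):
--                     if plan[r + i][c + j] >= 1:
--                         count += 1
--
--             if count == 25:
--                 return True
--
--     return False
-- ===== SOURCE B (Python) =====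
-- def is_probably_easter_eggs(robots, width, height):
--     # 2D prefix sums of the 0/1 occupancy grid: each 5x5 window is tested in O(1).
--     grid = [[0] * width for _ in range(height)]
--     for x, y in robots:
--         grid[y][x] = 1
--     # P[r][c] = number of occupied cells with row < r and column < c
--     P = [[0] * (width + 1)]
--     for r in range(height):
--         prev = P[-1]
--         new = [0]
--         acc = 0
--         for c in range(width):
--             acc += grid[r][c]
--             new.append(prev[c + 1] + acc)
--         P.append(new)
--     for r in range(height - 4):
--         for c in range(width - 4):
--             if P[r + 5][c + 5] - P[r][c + 5] - P[r + 5][c] + P[r][c] == 25: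
--                 return True
--     return False
-- ===== Notes on version B (the rewrite author's own statement) =====
-- stated objective: faster
-- what changed: B builds a 0/1 occupancy grid and a 2D prefix-sum table over it, so each 5x5 window is tested with one O(1) inclusion-exclusion subtraction instead of A's rescan of all 25 cells per window.
import Mathlib
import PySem

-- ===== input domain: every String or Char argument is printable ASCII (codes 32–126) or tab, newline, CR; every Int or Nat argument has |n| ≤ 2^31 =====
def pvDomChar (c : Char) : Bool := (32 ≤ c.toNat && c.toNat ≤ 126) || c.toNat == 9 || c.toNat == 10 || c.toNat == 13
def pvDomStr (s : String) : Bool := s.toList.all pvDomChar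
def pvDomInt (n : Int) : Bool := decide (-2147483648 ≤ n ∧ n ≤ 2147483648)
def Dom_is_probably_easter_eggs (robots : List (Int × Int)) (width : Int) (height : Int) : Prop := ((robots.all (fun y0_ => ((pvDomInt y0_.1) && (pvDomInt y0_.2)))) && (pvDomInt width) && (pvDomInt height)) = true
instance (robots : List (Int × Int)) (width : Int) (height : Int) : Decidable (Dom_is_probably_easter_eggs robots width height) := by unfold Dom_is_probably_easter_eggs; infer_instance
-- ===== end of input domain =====

-- B replaces A's per-window 25-cell rescan by a 2D prefix-sum table of the occupancy grid (O(1) per window); measured faster.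


-- ===== PORT A =====
def is_probably_easter_eggs (robots : List (Int × Int)) (width : Int) (height : Int) : Bool :=
  let plan0 : List (List Int) :=
    (PySem.List.pyRange 0 height 1).map (fun _ => (PySem.List.pyRange 0 width 1).map (fun _ => (0 : Int)))
  let plan := robots.foldl (fun plan robot =>
    let row := PySem.List.pyGetD plan robot.2 []
    PySem.List.pySetD plan robot.2
      (PySem.List.pySetD row robot.1 (PySem.List.pyGetD row robot.1 0 + 1))) plan0
  (PySem.List.pyRange 0 (height - 4) 1).any (fun r =>
    (PySem.List.pyRange 0 (width - 4) 1).any (fun c =>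
      let count := (PySem.List.pyRange 0 5 1).foldl (fun cnt i =>
        (PySem.List.pyRange 0 5 1).foldl (fun cnt j =>
          if PySem.List.pyGetD (PySem.List.pyGetD plan (r + i) []) (c + j) 0 ≥ 1 then cnt + 1
          else cnt) cnt) (0 : Int)
      count == 25))

-- ===== PORT B =====
def is_probably_easter_eggs_alt (robots : List (Int × Int)) (width : Int) (height : Int) : Bool :=
  let grid := robots.foldl (fun grid p =>
    let row := PySem.List.pyGetD grid p.2 []
    PySem.List.pySetD grid p.2 (PySem.List.pySetD row p.1 1))
    ((PySem.List.pyRange 0 height 1).map (fun _ => (PySem.List.pyRange 0 width 1).map (fun _ => (0 : Int))))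
  let P : List (List Int) := (PySem.List.pyRange 0 height 1).foldl (fun P r =>
    let prev := PySem.List.pyGetD P (-1) []
    let step := (PySem.List.pyRange 0 width 1).foldl (fun (s : List Int × Int) c =>
      let acc := s.2 + PySem.List.pyGetD (PySem.List.pyGetD grid r []) c 0
      (s.1 ++ [PySem.List.pyGetD prev (c + 1) 0 + acc], acc)) ([0], (0 : Int))
    P ++ [step.1]) [PySem.List.pyRepeat [(0 : Int)] (width + 1)]
  (PySem.List.pyRange 0 (height - 4) 1).any (fun r =>
    (PySem.List.pyRange 0 (width - 4) 1).any (fun c =>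
      (PySem.List.pyGetD (PySem.List.pyGetD P (r + 5) []) (c + 5) 0
        - PySem.List.pyGetD (PySem.List.pyGetD P r []) (c + 5) 0
        - PySem.List.pyGetD (PySem.List.pyGetD P (r + 5) []) c 0
        + PySem.List.pyGetD (PySem.List.pyGetD P r []) c 0) == 25))

-- ===== PRECONDITION & SPEC =====
-- Pre_ excludes exactly the inputs on which A raises an IndexError: a robot whose
-- coordinates fall outside Python's (negative indices included) index range of the grid.
def Pre_is_probably_easter_eggs (robots : List (Int × Int)) (width : Int) (height : Int) : Prop :=
  ∀ p ∈ robots, -width ≤ p.1 ∧ p.1 < width ∧ -height ≤ p.2 ∧ p.2 < height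
instance (robots : List (Int × Int)) (width : Int) (height : Int) : Decidable (Pre_is_probably_easter_eggs robots width height) := by unfold Pre_is_probably_easter_eggs; infer_instance

def pvWitness_is_probably_easter_eggs : (List (Int × Int)) × Int × Int := ([(0, 0), (2, 3)], 6, 7)

def Spec_is_probably_easter_eggs (robots : List (Int × Int)) (width : Int) (height : Int) (out : Bool) : Prop := out = is_probably_easter_eggs_alt robots width height
instance (robots : List (Int × Int)) (width : Int) (height : Int) (out : Bool) : Decidable (Spec_is_probably_easter_eggs robots width height out) := by unfold Spec_is_probably_easter_eggs; infer_instance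

-- ===== CLAIM (what is proved, stated in full; the proofs are below) =====
def Claim_equal_is_probably_easter_eggs : Prop := ∀ (robots : List (Int × Int)) (width : Int) (height : Int), Dom_is_probably_easter_eggs robots width height → Pre_is_probably_easter_eggs robots width height → Spec_is_probably_easter_eggs robots width height (is_probably_easter_eggs robots width height)

-- ===== LEMMAS AND PROOFS =====

-- index normalization: Python's possibly-negative in-range index
def pvNIdx (len : Nat) (i : Int) : Nat := (if i < 0 then i + len else i).toNat

theorem pvIdx_eq (n : Nat) (i : Int) (h1 : -(n:Int) ≤ i) (h2 : i < (n:Int)) :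
    PySem.List.pyIdx? n i = some (pvNIdx n i) := by
  unfold PySem.List.pyIdx? pvNIdx
  by_cases h : 0 ≤ i
  · rw [if_pos h, if_pos h2, if_neg (by omega : ¬ i < 0)]
  · rw [if_neg h, if_pos (by omega : -(n:Int) ≤ i), if_pos (by omega : i < 0)]
    congr 1; omega

theorem pvSetD_eq {α : Type} (xs : List α) (i : Int) (v : α) (h1 : -(xs.length:Int) ≤ i) (h2 : i < (xs.length:Int)) :
    PySem.List.pySetD xs i v = xs.set (pvNIdx xs.length i) v := by
  unfold PySem.List.pySetD PySem.List.pySet?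
  rw [pvIdx_eq _ _ h1 h2]; rfl

theorem pvGetD_eq {α : Type} (xs : List α) (i : Int) (d : α) (h1 : -(xs.length:Int) ≤ i) (h2 : i < (xs.length:Int)) :
    PySem.List.pyGetD xs i d = xs.getD (pvNIdx xs.length i) d := by
  unfold PySem.List.pyGetD PySem.List.pyGet?
  rw [pvIdx_eq _ _ h1 h2]
  simp [List.getD]

theorem pvNIdx_lt (n : Nat) (i : Int) (h1 : -(n:Int) ≤ i) (h2 : i < (n:Int)) : pvNIdx n i < n := by
  unfold pvNIdx; split_ifs <;> omega

theorem pvNIdx_mod (h : Int) (y : Int) (hh : 0 < h) (hy1 : -h ≤ y) (hy2 : y < h) :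
    (pvNIdx h.toNat y : Int) = PySem.Int.mod y h := by
  rw [PySem.Int.mod_eq_emod_of_pos hh]
  unfold pvNIdx
  rw [Int.toNat_of_nonneg hh.le]
  split_ifs with hc
  · have h1 : (y + h) % h = y % h := by simp
    have h2 : (y + h) % h = y + h := Int.emod_eq_of_lt (by omega) (by omega)
    omega
  · have h2 : y % h = y := Int.emod_eq_of_lt (by omega) (by omega)
    omega

theorem pvNIdx_nonneg_cast (i : Int) (len : Nat) (h : 0 ≤ i) : pvNIdx len i = i.toNat := by
  unfold pvNIdx; rw [if_neg (by omega)]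

-- the modded robot positions, the occupancy predicate and the 5x5 window sum (proof-side model)
def pvMods (robots : List (Int × Int)) (w h : Int) : List (Int × Int) :=
  robots.map (fun p => (PySem.Int.mod p.1 w, PySem.Int.mod p.2 h))

def pvInd (robots : List (Int × Int)) (w h : Int) (c r : Int) : Int :=
  if (c, r) ∈ pvMods robots w h then 1 else 0

def pvRowS (robots : List (Int × Int)) (w h : Int) (r : Int) (c : Nat) : Int :=
  ((List.range c).map (fun j => pvInd robots w h (j:Int) r)).sum

def pvS (robots : List (Int × Int)) (w h : Int) (rn c : Nat) : Int :=
  ((List.range rn).map (fun i => pvRowS robots w h (i:Int) c)).sum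

def pvWin (robots : List (Int × Int)) (w h r c : Int) : Int :=
  (([0,1,2,3,4] : List Int).map (fun i =>
    (([0,1,2,3,4] : List Int).map (fun j => pvInd robots w h (c+j) (r+i))).sum)).sum


theorem pvRowS_zero (robots : List (Int × Int)) (w h : Int) (r : Int) : pvRowS robots w h r 0 = 0 := rfl

theorem pvS_zero' (robots : List (Int × Int)) (w h : Int) (rn : Nat) : pvS robots w h rn 0 = 0 := by
  unfold pvS
  simp [pvRowS_zero]

theorem pvS_succ (robots : List (Int × Int)) (w h : Int) (n k : Nat) :
    pvS robots w h (n+1) k = pvS robots w h n k + pvRowS robots w h (n:Int) k := by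
  unfold pvS
  rw [List.range_succ]
  simp

-- ===== A side =====

def pvStepA (plan : List (List Int)) (robot : Int × Int) : List (List Int) :=
  let row := PySem.List.pyGetD plan robot.2 []
  PySem.List.pySetD plan robot.2
    (PySem.List.pySetD row robot.1 (PySem.List.pyGetD row robot.1 0 + 1))

theorem pvGridA (w h : Int) (robots : List (Int × Int)) (g : List (List Int))
    (hpre : ∀ p ∈ robots, -w ≤ p.1 ∧ p.1 < w ∧ -h ≤ p.2 ∧ p.2 < h)
    (hlen : g.length = h.toNat) (hrow : ∀ row ∈ g, row.length = w.toNat) :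
    (robots.foldl pvStepA g).length = h.toNat ∧
    (∀ row ∈ robots.foldl pvStepA g, row.length = w.toNat) ∧
    (∀ rn cn : Nat, rn < h.toNat → cn < w.toNat →
      ((robots.foldl pvStepA g).getD rn []).getD cn 0
        = (g.getD rn []).getD cn 0 + ((pvMods robots w h).count ((cn:Int),(rn:Int)) : Int)) := by
  induction robots generalizing g with
  | nil =>
    refine ⟨hlen, hrow, ?_⟩
    intro rn cn hrn hcn
    simp [pvMods]
  | cons p robots ih =>
    obtain ⟨hp1, hp2, hp3, hp4⟩ := hpre p List.mem_cons_self
    have hw0 : 0 < w := by omega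
    have hh0 : 0 < h := by omega
    have hhcast : ((h.toNat : Nat) : Int) = h := Int.toNat_of_nonneg hh0.le
    have hwcast : ((w.toNat : Nat) : Int) = w := Int.toNat_of_nonneg hw0.le
    have hglen : ((g.length : Nat) : Int) = h := by rw [hlen, hhcast]
    set ri := pvNIdx h.toNat p.2 with hri
    set ci := pvNIdx w.toNat p.1 with hci
    have hriB : ri < h.toNat := pvNIdx_lt _ _ (by omega) (by omega)
    have hciB : ci < w.toNat := pvNIdx_lt _ _ (by omega) (by omega)
    have hrowmem : g.getD ri [] ∈ g := by
      rw [List.getD_eq_getElem?_getD, List.getElem?_eq_getElem (by omega : ri < g.length)]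
      exact List.getElem_mem _
    have hrowlen : (g.getD ri []).length = w.toNat := hrow _ hrowmem
    have hstep : pvStepA g p
        = g.set ri ((g.getD ri []).set ci ((g.getD ri []).getD ci 0 + 1)) := by
      unfold pvStepA
      rw [pvGetD_eq g p.2 [] (by omega) (by omega)]
      rw [(by rw [hlen] : pvNIdx g.length p.2 = pvNIdx h.toNat p.2)]
      change PySem.List.pySetD g p.2 (PySem.List.pySetD (g.getD ri [])
        p.1 (PySem.List.pyGetD (g.getD ri []) p.1 0 + 1)) = _
      rw [pvGetD_eq _ p.1 0 (by rw [hrowlen]; omega) (by rw [hrowlen]; omega)]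
      rw [(by rw [hrowlen] : pvNIdx (g.getD ri []).length p.1 = pvNIdx w.toNat p.1)]
      rw [pvSetD_eq _ p.1 _ (by rw [hrowlen]; omega) (by rw [hrowlen]; omega)]
      rw [(by rw [hrowlen] : pvNIdx (g.getD ri []).length p.1 = pvNIdx w.toNat p.1)]
      rw [pvSetD_eq g p.2 _ (by omega) (by omega)]
      rw [(by rw [hlen] : pvNIdx g.length p.2 = pvNIdx h.toNat p.2)]
    set g1 := g.set ri ((g.getD ri []).set ci ((g.getD ri []).getD ci 0 + 1)) with hg1
    have hlen1 : g1.length = h.toNat := by rw [hg1, List.length_set, hlen]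
    have hrow1 : ∀ row ∈ g1, row.length = w.toNat := by
      intro row hmem
      rcases List.mem_or_eq_of_mem_set hmem with hmem' | heq
      · exact hrow row hmem'
      · rw [heq, List.length_set, hrowlen]
    obtain ⟨l1, l2, l3⟩ := ih g1 (fun q hq => hpre q (List.mem_cons_of_mem _ hq)) hlen1 hrow1
    rw [List.foldl_cons, hstep]
    refine ⟨l1, l2, ?_⟩
    intro rn cn hrn hcn
    rw [l3 rn cn hrn hcn]
    have hmodp : (PySem.Int.mod p.1 w, PySem.Int.mod p.2 h) = ((ci : Int), (ri : Int)) := by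
      rw [Prod.mk.injEq]
      constructor
      · rw [hci, pvNIdx_mod w p.1 hw0 hp1 hp2]
      · rw [hri, pvNIdx_mod h p.2 hh0 hp3 hp4]
    have hcnt : ((pvMods (p :: robots) w h).count ((cn:Int),(rn:Int)) : Int)
        = ((pvMods robots w h).count ((cn:Int),(rn:Int)) : Int)
          + (if ci = cn ∧ ri = rn then 1 else 0) := by
      show ((((PySem.Int.mod p.1 w, PySem.Int.mod p.2 h) :: pvMods robots w h).count ((cn:Int),(rn:Int)) : Nat) : Int) = _
      rw [List.count_cons, hmodp]
      by_cases hcond : ci = cn ∧ ri = rn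
      · rw [if_pos (by simp [hcond.1, hcond.2]), if_pos hcond]
        push_cast; ring
      · have : ¬ (((ci:Int),(ri:Int)) == ((cn:Int),(rn:Int))) = true := by
          simp only [beq_iff_eq, Prod.mk.injEq]
          intro hcc
          exact hcond ⟨Nat.cast_injective hcc.1, Nat.cast_injective hcc.2⟩
        rw [if_neg this, if_neg hcond]
        push_cast; ring
    have hcell : (g1.getD rn []).getD cn 0
        = (g.getD rn []).getD cn 0 + (if ci = cn ∧ ri = rn then 1 else 0) := by
      rw [hg1]
      by_cases hrr : ri = rn
      · have : (g.set ri ((g.getD ri []).set ci ((g.getD ri []).getD ci 0 + 1))).getD rn []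
            = (g.getD ri []).set ci ((g.getD ri []).getD ci 0 + 1) := by
          rw [List.getD_eq_getElem?_getD, List.getElem?_set, if_pos hrr,
            if_pos (by omega : ri < g.length)]
          rfl
        rw [this]
        by_cases hcc : ci = cn
        · rw [List.getD_eq_getElem?_getD, List.getElem?_set, if_pos hcc,
            if_pos (by omega : ci < (g.getD ri []).length)]
          rw [if_pos ⟨hcc, hrr⟩]
          subst hrr; subst hcc
          simp
        · rw [List.getD_eq_getElem?_getD, List.getElem?_set, if_neg hcc,
            if_neg (by tauto), ← List.getD_eq_getElem?_getD]
          subst hrr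
          ring
      · have : (g.set ri ((g.getD ri []).set ci ((g.getD ri []).getD ci 0 + 1))).getD rn []
            = g.getD rn [] := by
          rw [List.getD_eq_getElem?_getD, List.getElem?_set, if_neg hrr,
            ← List.getD_eq_getElem?_getD]
        rw [this, if_neg (by tauto)]
        ring
    rw [hcell, hcnt]
    ring

def pvStepB (grid : List (List Int)) (p : Int × Int) : List (List Int) :=
  let row := PySem.List.pyGetD grid p.2 []
  PySem.List.pySetD grid p.2 (PySem.List.pySetD row p.1 1)

theorem pvGridB (w h : Int) (robots : List (Int × Int)) (g : List (List Int))
    (hpre : ∀ p ∈ robots, -w ≤ p.1 ∧ p.1 < w ∧ -h ≤ p.2 ∧ p.2 < h)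
    (hlen : g.length = h.toNat) (hrow : ∀ row ∈ g, row.length = w.toNat) :
    (robots.foldl pvStepB g).length = h.toNat ∧
    (∀ row ∈ robots.foldl pvStepB g, row.length = w.toNat) ∧
    (∀ rn cn : Nat, rn < h.toNat → cn < w.toNat →
      ((robots.foldl pvStepB g).getD rn []).getD cn 0
        = if ((cn:Int),(rn:Int)) ∈ pvMods robots w h then 1
          else (g.getD rn []).getD cn 0) := by
  induction robots generalizing g with
  | nil =>
    refine ⟨hlen, hrow, ?_⟩
    intro rn cn hrn hcn
    simp [pvMods]
  | cons p robots ih =>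
    obtain ⟨hp1, hp2, hp3, hp4⟩ := hpre p List.mem_cons_self
    have hw0 : 0 < w := by omega
    have hh0 : 0 < h := by omega
    have hhcast : ((h.toNat : Nat) : Int) = h := Int.toNat_of_nonneg hh0.le
    have hwcast : ((w.toNat : Nat) : Int) = w := Int.toNat_of_nonneg hw0.le
    have hglen : ((g.length : Nat) : Int) = h := by rw [hlen, hhcast]
    set ri := pvNIdx h.toNat p.2 with hri
    set ci := pvNIdx w.toNat p.1 with hci
    have hriB : ri < h.toNat := pvNIdx_lt _ _ (by omega) (by omega)
    have hciB : ci < w.toNat := pvNIdx_lt _ _ (by omega) (by omega)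
    have hrowmem : g.getD ri [] ∈ g := by
      rw [List.getD_eq_getElem?_getD, List.getElem?_eq_getElem (by omega : ri < g.length)]
      exact List.getElem_mem _
    have hrowlen : (g.getD ri []).length = w.toNat := hrow _ hrowmem
    have hstep : pvStepB g p = g.set ri ((g.getD ri []).set ci 1) := by
      unfold pvStepB
      rw [pvGetD_eq g p.2 [] (by omega) (by omega)]
      rw [(by rw [hlen] : pvNIdx g.length p.2 = pvNIdx h.toNat p.2)]
      change PySem.List.pySetD g p.2 (PySem.List.pySetD (g.getD ri []) p.1 1) = _
      rw [pvSetD_eq _ p.1 _ (by rw [hrowlen]; omega) (by rw [hrowlen]; omega)]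
      rw [(by rw [hrowlen] : pvNIdx (g.getD ri []).length p.1 = pvNIdx w.toNat p.1)]
      rw [pvSetD_eq g p.2 _ (by omega) (by omega)]
      rw [(by rw [hlen] : pvNIdx g.length p.2 = pvNIdx h.toNat p.2)]
    set g1 := g.set ri ((g.getD ri []).set ci 1) with hg1
    have hlen1 : g1.length = h.toNat := by rw [hg1, List.length_set, hlen]
    have hrow1 : ∀ row ∈ g1, row.length = w.toNat := by
      intro row hmem
      rcases List.mem_or_eq_of_mem_set hmem with hmem' | heq
      · exact hrow row hmem'
      · rw [heq, List.length_set, hrowlen]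
    obtain ⟨l1, l2, l3⟩ := ih g1 (fun q hq => hpre q (List.mem_cons_of_mem _ hq)) hlen1 hrow1
    rw [List.foldl_cons, hstep]
    refine ⟨l1, l2, ?_⟩
    intro rn cn hrn hcn
    rw [l3 rn cn hrn hcn]
    have hmodp : (PySem.Int.mod p.1 w, PySem.Int.mod p.2 h) = ((ci : Int), (ri : Int)) := by
      rw [Prod.mk.injEq]
      constructor
      · rw [hci, pvNIdx_mod w p.1 hw0 hp1 hp2]
      · rw [hri, pvNIdx_mod h p.2 hh0 hp3 hp4]
    have hcell : (g1.getD rn []).getD cn 0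
        = if ci = cn ∧ ri = rn then 1 else (g.getD rn []).getD cn 0 := by
      rw [hg1]
      by_cases hrr : ri = rn
      · have : (g.set ri ((g.getD ri []).set ci 1)).getD rn []
            = (g.getD ri []).set ci 1 := by
          rw [List.getD_eq_getElem?_getD, List.getElem?_set, if_pos hrr,
            if_pos (by omega : ri < g.length)]
          rfl
        rw [this]
        by_cases hcc : ci = cn
        · rw [List.getD_eq_getElem?_getD, List.getElem?_set, if_pos hcc,
            if_pos (by omega : ci < (g.getD ri []).length)]
          rw [if_pos ⟨hcc, hrr⟩]
          rfl
        · rw [List.getD_eq_getElem?_getD, List.getElem?_set, if_neg hcc,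
            if_neg (by tauto), ← List.getD_eq_getElem?_getD]
          subst hrr
          rfl
      · have : (g.set ri ((g.getD ri []).set ci 1)).getD rn []
            = g.getD rn [] := by
          rw [List.getD_eq_getElem?_getD, List.getElem?_set, if_neg hrr,
            ← List.getD_eq_getElem?_getD]
        rw [this, if_neg (by tauto)]
    rw [hcell]
    have hmemiff : (((cn:Int),(rn:Int)) ∈ pvMods (p :: robots) w h)
        ↔ ((ci = cn ∧ ri = rn) ∨ ((cn:Int),(rn:Int)) ∈ pvMods robots w h) := by
      show (((cn:Int),(rn:Int)) ∈ (PySem.Int.mod p.1 w, PySem.Int.mod p.2 h) :: pvMods robots w h) ↔ _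
      rw [List.mem_cons, hmodp]
      constructor
      · rintro (heq | hmem)
        · rw [Prod.mk.injEq] at heq
          exact Or.inl ⟨(Nat.cast_injective heq.1).symm, (Nat.cast_injective heq.2).symm⟩
        · exact Or.inr hmem
      · rintro (⟨h1, h2⟩ | hmem)
        · subst h1; subst h2; exact Or.inl rfl
        · exact Or.inr hmem
    by_cases hmem : ((cn:Int),(rn:Int)) ∈ pvMods robots w h
    · rw [if_pos hmem, if_pos (hmemiff.mpr (Or.inr hmem))]
    · rw [if_neg hmem]
      by_cases hcr : ci = cn ∧ ri = rn
      · rw [if_pos hcr, if_pos (hmemiff.mpr (Or.inl hcr))]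
      · rw [if_neg hcr, if_neg (by rw [hmemiff]; tauto)]

-- ===== B side =====

def pvStepRow (grid : List (List Int)) (prev : List Int) (r : Int)
    (s : List Int × Int) (c : Int) : List Int × Int :=
  let acc := s.2 + PySem.List.pyGetD (PySem.List.pyGetD grid r []) c 0
  (s.1 ++ [PySem.List.pyGetD prev (c + 1) 0 + acc], acc)

theorem pvRowFold (robots : List (Int × Int)) (w h : Int) (grid : List (List Int))
    (prev : List Int) (r : Int) (m : Nat) (hm : m < prev.length)
    (hcell : ∀ c : Int, 0 ≤ c → c < (m:Int) →
      PySem.List.pyGetD (PySem.List.pyGetD grid r []) c 0 = pvInd robots w h c r) :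
    ((PySem.List.pyRange 0 (m:Int) 1).foldl (pvStepRow grid prev r) ([0], 0)).2
      = pvRowS robots w h r m ∧
    ((PySem.List.pyRange 0 (m:Int) 1).foldl (pvStepRow grid prev r) ([0], 0)).1.length = m + 1 ∧
    (∀ k : Nat, k ≤ m →
      ((PySem.List.pyRange 0 (m:Int) 1).foldl (pvStepRow grid prev r) ([0], 0)).1.getD k 0
        = if k = 0 then 0 else prev.getD k 0 + pvRowS robots w h r k) := by
  induction m with
  | zero =>
    refine ⟨rfl, rfl, ?_⟩
    intro k hk
    interval_cases k
    rfl
  | succ m ih =>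
    obtain ⟨ih2, ihlen, ihget⟩ := ih (by omega)
      (fun c h1 h2 => hcell c h1 (by push_cast at h2 ⊢; omega))
    have hsplit : PySem.List.pyRange 0 ((m+1 : Nat) : Int) 1
        = PySem.List.pyRange 0 (m : Int) 1 ++ [(m : Int)] := by
      push_cast
      exact PySem.List.pyRange_one_succ_right (by positivity)
    rw [hsplit, List.foldl_append]
    set res := (PySem.List.pyRange 0 (m:Int) 1).foldl (pvStepRow grid prev r) ([0], 0) with hres
    have hrowsucc : pvRowS robots w h r (m+1)
        = pvRowS robots w h r m + pvInd robots w h (m:Int) r := by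
      unfold pvRowS
      rw [List.range_succ]
      simp
    have hacc : res.2 + PySem.List.pyGetD (PySem.List.pyGetD grid r []) ((m:Nat):Int) 0
        = pvRowS robots w h r (m+1) := by
      rw [hrowsucc, ih2, hcell (m:Int) (by positivity) (by push_cast; omega)]
    have hprevget : PySem.List.pyGetD prev ((m:Int) + 1) 0 = prev.getD (m+1) 0 := by
      have : ((m:Int) + 1) = ((m+1 : Nat) : Int) := by push_cast; ring
      rw [this, PySem.List.pyGetD_natCast]
    refine ⟨?_, ?_, ?_⟩
    · show res.2 + PySem.List.pyGetD (PySem.List.pyGetD grid r []) ((m:Nat):Int) 0 = _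
      exact hacc
    · show (res.1 ++ [_]).length = m + 2
      simp [ihlen]
    · intro k hk
      show (res.1 ++ [PySem.List.pyGetD prev ((m:Int)+1) 0 +
        (res.2 + PySem.List.pyGetD (PySem.List.pyGetD grid r []) ((m:Nat):Int) 0)]).getD k 0 = _
      rcases Nat.lt_or_ge k (m+1) with hlt | hge
      · rw [List.getD_append _ _ _ _ (by omega : k < res.1.length)]
        exact ihget k (by omega)
      · have hkm : k = m + 1 := by omega
        subst hkm
        have : (res.1 ++ [PySem.List.pyGetD prev ((m:Int)+1) 0 +
            (res.2 + PySem.List.pyGetD (PySem.List.pyGetD grid r []) ((m:Nat):Int) 0)]).getD (m+1) 0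
            = PySem.List.pyGetD prev ((m:Int)+1) 0 +
              (res.2 + PySem.List.pyGetD (PySem.List.pyGetD grid r []) ((m:Nat):Int) 0) := by
          have hlen' : res.1.length = m + 1 := ihlen
          rw [List.getD_eq_getElem?_getD, List.getElem?_append_right (by omega)]
          simp [hlen']
        rw [this, hacc, hprevget, if_neg (by omega)]

def pvStepP (grid : List (List Int)) (width : Int) (P : List (List Int)) (r : Int) :
    List (List Int) :=
  let prev := PySem.List.pyGetD P (-1) []
  let step := (PySem.List.pyRange 0 width 1).foldl
    (fun (s : List Int × Int) c =>
      let acc := s.2 + PySem.List.pyGetD (PySem.List.pyGetD grid r []) c 0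
      (s.1 ++ [PySem.List.pyGetD prev (c + 1) 0 + acc], acc)) ([0], (0 : Int))
  P ++ [step.1]

theorem pvStepP_eq (grid : List (List Int)) (width : Int) (P : List (List Int)) (r : Int) :
    pvStepP grid width P r
      = P ++ [((PySem.List.pyRange 0 width 1).foldl
          (pvStepRow grid (PySem.List.pyGetD P (-1) []) r) ([0], 0)).1] := rfl

theorem pvPFold (robots : List (Int × Int)) (w h : Int) (grid : List (List Int))
    (hw : 0 ≤ w) (n : Nat)
    (hcell : ∀ r c : Int, 0 ≤ r → r < (n:Int) → 0 ≤ c → c < w →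
      PySem.List.pyGetD (PySem.List.pyGetD grid r []) c 0 = pvInd robots w h c r) :
    ((PySem.List.pyRange 0 (n:Int) 1).foldl (pvStepP grid w)
        [PySem.List.pyRepeat [(0:Int)] (w + 1)]).length = n + 1 ∧
    (∀ row ∈ (PySem.List.pyRange 0 (n:Int) 1).foldl (pvStepP grid w)
        [PySem.List.pyRepeat [(0:Int)] (w + 1)], row.length = w.toNat + 1) ∧
    (∀ rn k : Nat, rn ≤ n → k ≤ w.toNat →
      (((PySem.List.pyRange 0 (n:Int) 1).foldl (pvStepP grid w)
        [PySem.List.pyRepeat [(0:Int)] (w + 1)]).getD rn []).getD k 0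
        = pvS robots w h rn k) := by
  induction n with
  | zero =>
    have h0 : PySem.List.pyRange 0 ((0:Nat):Int) 1 = [] := by
      simp
    rw [h0]
    simp only [List.foldl_nil]
    refine ⟨rfl, ?_, ?_⟩
    · intro row hrow
      rw [List.mem_singleton.mp hrow, PySem.List.pyRepeat_singleton, List.length_replicate]
      omega
    · intro rn k hrn hk
      interval_cases rn
      rw [List.getD_cons_zero, PySem.List.pyRepeat_singleton]
      have hz : pvS robots w h 0 k = 0 := rfl
      rw [hz]
      simp only [List.getD_eq_getElem?_getD, List.getElem?_replicate]
      split <;> rfl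
  | succ n ih =>
    obtain ⟨ihlen, ihrow, ihget⟩ := ih
      (fun r c hr1 hr2 hc1 hc2 => hcell r c hr1 (by push_cast at hr2 ⊢; omega) hc1 hc2)
    have hsplit : PySem.List.pyRange 0 ((n+1 : Nat) : Int) 1
        = PySem.List.pyRange 0 (n : Int) 1 ++ [(n : Int)] := by
      push_cast
      exact PySem.List.pyRange_one_succ_right (by positivity)
    rw [hsplit, List.foldl_append]
    set P := (PySem.List.pyRange 0 (n:Int) 1).foldl (pvStepP grid w)
        [PySem.List.pyRepeat [(0:Int)] (w + 1)] with hP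
    have hPne : P ≠ [] := by
      intro hcon
      rw [hcon] at ihlen
      simp at ihlen
    have hprev : PySem.List.pyGetD P (-1) [] = P.getD n [] := by
      rw [PySem.List.pyGetD_neg_one P [] hPne, List.getLast_eq_getElem hPne]
      rw [List.getD_eq_getElem?_getD, List.getElem?_eq_getElem (by omega)]
      simp [ihlen]
    have hprevmem : P.getD n [] ∈ P := by
      rw [List.getD_eq_getElem?_getD, List.getElem?_eq_getElem (by omega : n < P.length)]
      exact List.getElem_mem _
    have hprevlen : (P.getD n []).length = w.toNat + 1 := ihrow _ hprevmem
    have hprevget : ∀ k ≤ w.toNat, (P.getD n []).getD k 0 = pvS robots w h n k :=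
      fun k hk => ihget n k (by omega) hk
    have hwcast : ((w.toNat : Nat) : Int) = w := Int.toNat_of_nonneg hw
    obtain ⟨hr2, hrlen, hrget⟩ := pvRowFold robots w h grid (P.getD n []) (n : Int) w.toNat
      (by omega)
      (fun c hc1 hc2 => hcell (n:Int) c (by positivity) (by push_cast; omega) hc1
        (by rw [← hwcast]; exact hc2))
    rw [hwcast] at hr2 hrlen hrget
    rw [List.foldl_cons, List.foldl_nil, pvStepP_eq, hprev]
    set new := ((PySem.List.pyRange 0 w 1).foldl
        (pvStepRow grid (P.getD n []) (n:Int)) ([0], 0)).1 with hnew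
    refine ⟨by simp [ihlen], ?_, ?_⟩
    · intro row hrow
      rcases List.mem_append.mp hrow with hmem | hmem
      · exact ihrow row hmem
      · rw [List.mem_singleton.mp hmem]
        exact hrlen
    · intro rn k hrn hk
      rcases Nat.lt_or_ge rn (n+1) with hlt | hge
      · rw [List.getD_append _ _ _ _ (by omega : rn < P.length)]
        exact ihget rn k (by omega) hk
      · have hrn' : rn = n + 1 := by omega
        subst hrn'
        have hgd : (P ++ [new]).getD (n+1) [] = new := by
          rw [List.getD_eq_getElem?_getD, List.getElem?_append_right (by omega)]
          simp [ihlen]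
        rw [hgd, hrget k hk]
        by_cases hk0 : k = 0
        · rw [if_pos hk0, hk0, pvS_zero']
        · rw [if_neg hk0, hprevget k hk, pvS_succ]

theorem pvWindowAlg (robots : List (Int × Int)) (w h : Int) (rn cn : Nat) :
    pvS robots w h (rn+5) (cn+5) - pvS robots w h rn (cn+5)
      - pvS robots w h (rn+5) cn + pvS robots w h rn cn
      = pvWin robots w h (rn:Int) (cn:Int) := by
  unfold pvS pvRowS pvWin
  simp [List.range_succ]
  ring



-- packaged forms of the two ports (definitional)
def pvPlan (robots : List (Int × Int)) (w h : Int) : List (List Int) :=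
  robots.foldl pvStepA
    ((PySem.List.pyRange 0 h 1).map (fun _ => (PySem.List.pyRange 0 w 1).map (fun _ => (0:Int))))

def pvGrid (robots : List (Int × Int)) (w h : Int) : List (List Int) :=
  robots.foldl pvStepB
    ((PySem.List.pyRange 0 h 1).map (fun _ => (PySem.List.pyRange 0 w 1).map (fun _ => (0:Int))))

def pvP (robots : List (Int × Int)) (w h : Int) : List (List Int) :=
  (PySem.List.pyRange 0 h 1).foldl (pvStepP (pvGrid robots w h) w)
    [PySem.List.pyRepeat [(0:Int)] (w + 1)]

theorem pvA_eq (robots : List (Int × Int)) (w h : Int) :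
    is_probably_easter_eggs robots w h
      = (PySem.List.pyRange 0 (h-4) 1).any (fun r =>
          (PySem.List.pyRange 0 (w-4) 1).any (fun c =>
            ((PySem.List.pyRange 0 5 1).foldl (fun cnt i =>
              (PySem.List.pyRange 0 5 1).foldl (fun cnt j =>
                if PySem.List.pyGetD (PySem.List.pyGetD (pvPlan robots w h) (r+i) []) (c+j) 0 ≥ 1
                then cnt + 1 else cnt) cnt) (0:Int)) == 25)) := rfl

theorem pvB_eq (robots : List (Int × Int)) (w h : Int) :
    is_probably_easter_eggs_alt robots w h
      = (PySem.List.pyRange 0 (h-4) 1).any (fun r =>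
          (PySem.List.pyRange 0 (w-4) 1).any (fun c =>
            (PySem.List.pyGetD (PySem.List.pyGetD (pvP robots w h) (r+5) []) (c+5) 0
              - PySem.List.pyGetD (PySem.List.pyGetD (pvP robots w h) r []) (c+5) 0
              - PySem.List.pyGetD (PySem.List.pyGetD (pvP robots w h) (r+5) []) c 0
              + PySem.List.pyGetD (PySem.List.pyGetD (pvP robots w h) r []) c 0) == 25)) := rfl

theorem pvCountFold (cell : Int → Int → Int) (l1 l2 : List Int) (a : Int) :
    l1.foldl (fun cnt i => l2.foldl (fun cnt j =>
        if cell i j ≥ 1 then cnt + 1 else cnt) cnt) a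
      = a + (l1.map (fun i =>
          (l2.map (fun j => if cell i j ≥ 1 then (1:Int) else 0)).sum)).sum := by
  induction l1 generalizing a with
  | nil => simp
  | cons x t ih =>
    rw [List.foldl_cons, ih, PySem.List.foldl_ite_add_one (fun j => cell x j ≥ 1) l2 a]
    rw [List.map_cons, List.sum_cons,
      ← PySem.List.sum_map_ite_one_zero (fun j => decide (cell x j ≥ 1)) l2]
    simp only [decide_eq_true_eq]
    ring

theorem pvConstRow_getD (l : List Int) (cn : Nat) :
    (l.map (fun _ => (0:Int))).getD cn 0 = 0 := by
  rw [List.getD_eq_getElem?_getD, List.getElem?_map]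
  cases l[cn]? <;> simp

theorem pvPlan0_cell (w h : Int) (rn cn : Nat) :
    ((((PySem.List.pyRange 0 h 1).map (fun _ => (PySem.List.pyRange 0 w 1).map (fun _ => (0:Int)))).getD rn []).getD cn 0) = 0 := by
  rcases Nat.lt_or_ge rn ((PySem.List.pyRange 0 h 1).map (fun _ => (PySem.List.pyRange 0 w 1).map (fun _ => (0:Int)))).length with hlt | hge
  · have hrow : (((PySem.List.pyRange 0 h 1).map (fun _ => (PySem.List.pyRange 0 w 1).map (fun _ => (0:Int)))).getD rn [])
        = (PySem.List.pyRange 0 w 1).map (fun _ => (0:Int)) := by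
      rw [List.getD_eq_getElem?_getD, List.getElem?_eq_getElem hlt]
      simp
    rw [hrow, pvConstRow_getD]
  · have hrow : (((PySem.List.pyRange 0 h 1).map (fun _ => (PySem.List.pyRange 0 w 1).map (fun _ => (0:Int)))).getD rn [])
        = [] := by
      rw [List.getD_eq_getElem?_getD, List.getElem?_eq_none (by omega)]
      rfl
    rw [hrow]
    rfl

-- ===== VERDICT (by name: the statement is the Claim_ definition above) =====
theorem is_probably_easter_eggs_spec : Claim_equal_is_probably_easter_eggs := by
  intro robots w h hdom hpre
  unfold Spec_is_probably_easter_eggs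
  rw [pvA_eq, pvB_eq]
  by_cases hsmall : w < 5 ∨ h < 5
  · rcases hsmall with h1 | h1
    · have hnil : PySem.List.pyRange 0 (w-4) 1 = [] :=
        PySem.List.pyRange_one_eq_nil (by omega)
      rw [hnil]
      simp
    · have hnil : PySem.List.pyRange 0 (h-4) 1 = [] :=
        PySem.List.pyRange_one_eq_nil (by omega)
      rw [hnil]
      rfl
  · obtain ⟨hw5', hh5'⟩ := not_or.mp hsmall
    have hw5 : 5 ≤ w := by omega
    have hh5 : 5 ≤ h := by omega
    have hwcast : ((w.toNat : Nat) : Int) = w := Int.toNat_of_nonneg (by omega)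
    have hhcast : ((h.toNat : Nat) : Int) = h := Int.toNat_of_nonneg (by omega)
    have hplan0len : ((PySem.List.pyRange 0 h 1).map (fun _ => (PySem.List.pyRange 0 w 1).map (fun _ => (0:Int)))).length = h.toNat := by
      rw [List.length_map, PySem.List.length_pyRange_one]
      omega
    have hplan0row : ∀ row ∈ (PySem.List.pyRange 0 h 1).map (fun _ => (PySem.List.pyRange 0 w 1).map (fun _ => (0:Int))), row.length = w.toNat := by
      intro row hmem
      obtain ⟨x, hx, hrow⟩ := List.mem_map.mp hmem
      rw [← hrow, List.length_map, PySem.List.length_pyRange_one]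
      omega
    -- A-side grid facts
    obtain ⟨hAlen0, hArow0, hAcell0⟩ := pvGridA w h robots _ hpre hplan0len hplan0row
    have hAlen : (pvPlan robots w h).length = h.toNat := hAlen0
    have hArow : ∀ row ∈ pvPlan robots w h, row.length = w.toNat := hArow0
    have hAcell : ∀ rn cn : Nat, rn < h.toNat → cn < w.toNat →
        ((pvPlan robots w h).getD rn []).getD cn 0
          = ((((PySem.List.pyRange 0 h 1).map (fun _ => (PySem.List.pyRange 0 w 1).map (fun _ => (0:Int)))).getD rn []).getD cn 0)
            + ((pvMods robots w h).count ((cn:Int),(rn:Int)) : Int) := hAcell0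
    -- B-side occupancy-grid facts
    obtain ⟨hBlen0, hBrow0, hBcell0⟩ := pvGridB w h robots _ hpre hplan0len hplan0row
    have hBlen : (pvGrid robots w h).length = h.toNat := hBlen0
    have hBrow : ∀ row ∈ pvGrid robots w h, row.length = w.toNat := hBrow0
    have hBcell : ∀ rn cn : Nat, rn < h.toNat → cn < w.toNat →
        ((pvGrid robots w h).getD rn []).getD cn 0
          = if ((cn:Int),(rn:Int)) ∈ pvMods robots w h then 1
            else ((((PySem.List.pyRange 0 h 1).map (fun _ => (PySem.List.pyRange 0 w 1).map (fun _ => (0:Int)))).getD rn []).getD cn 0) := hBcell0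
    have hgcell : ∀ r c : Int, 0 ≤ r → r < h → 0 ≤ c → c < w →
        PySem.List.pyGetD (PySem.List.pyGetD (pvGrid robots w h) r []) c 0
          = pvInd robots w h c r := by
      intro r c hr0 hrh hc0 hcw
      rw [pvGetD_eq (pvGrid robots w h) r [] (by rw [hBlen]; omega) (by rw [hBlen]; omega)]
      rw [(by rw [hBlen] : pvNIdx (pvGrid robots w h).length r = pvNIdx h.toNat r)]
      rw [pvNIdx_nonneg_cast _ _ hr0]
      have hrowmem : (pvGrid robots w h).getD r.toNat [] ∈ pvGrid robots w h := by
        rw [List.getD_eq_getElem?_getD, List.getElem?_eq_getElem (by rw [hBlen]; omega)]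
        exact List.getElem_mem _
      have hrowlen : ((pvGrid robots w h).getD r.toNat []).length = w.toNat := hBrow _ hrowmem
      rw [pvGetD_eq _ c 0 (by rw [hrowlen]; omega) (by rw [hrowlen]; omega)]
      rw [(by rw [hrowlen] : pvNIdx ((pvGrid robots w h).getD r.toNat []).length c = pvNIdx w.toNat c)]
      rw [pvNIdx_nonneg_cast _ _ hc0]
      rw [hBcell r.toNat c.toNat (by omega) (by omega), pvPlan0_cell]
      rw [Int.toNat_of_nonneg hr0, Int.toNat_of_nonneg hc0]
      rfl
    -- B-side prefix facts
    have hPfacts := pvPFold robots w h (pvGrid robots w h) (by omega) h.toNat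
      (fun r c hr1 hr2 hc1 hc2 => hgcell r c hr1 (by rwa [hhcast] at hr2) hc1 hc2)
    rw [hhcast] at hPfacts
    obtain ⟨hPlen0, hProw0, hPcell0⟩ := hPfacts
    have hPlen : (pvP robots w h).length = h.toNat + 1 := hPlen0
    have hProw : ∀ row ∈ pvP robots w h, row.length = w.toNat + 1 := hProw0
    have hPcell : ∀ rn k : Nat, rn ≤ h.toNat → k ≤ w.toNat →
        ((pvP robots w h).getD rn []).getD k 0 = pvS robots w h rn k := hPcell0
    apply PySem.List.any_congr_mem
    intro r hr
    rw [PySem.List.mem_pyRange_one] at hr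
    dsimp only
    apply PySem.List.any_congr_mem
    intro c hc
    rw [PySem.List.mem_pyRange_one] at hc
    dsimp only
    -- A value
    rw [(by decide : PySem.List.pyRange 0 5 1 = [0,1,2,3,4])]
    rw [pvCountFold (fun i j => PySem.List.pyGetD (PySem.List.pyGetD (pvPlan robots w h) (r+i) []) (c+j) 0) [0,1,2,3,4] [0,1,2,3,4] 0]
    have hterm : ∀ i ∈ ([0,1,2,3,4] : List Int), ∀ j ∈ ([0,1,2,3,4] : List Int),
        (if PySem.List.pyGetD (PySem.List.pyGetD (pvPlan robots w h) (r+i) []) (c+j) 0 ≥ 1 then (1:Int) else 0)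
          = pvInd robots w h (c+j) (r+i) := by
      intro i hi j hj
      have hi' : 0 ≤ i ∧ i ≤ 4 := by
        simp at hi
        rcases hi with rfl | rfl | rfl | rfl | rfl <;> norm_num
      have hj' : 0 ≤ j ∧ j ≤ 4 := by
        simp at hj
        rcases hj with rfl | rfl | rfl | rfl | rfl <;> norm_num
      have hri : 0 ≤ r + i ∧ r + i < h := by omega
      have hcj : 0 ≤ c + j ∧ c + j < w := by omega
      rw [pvGetD_eq (pvPlan robots w h) (r+i) [] (by rw [hAlen]; omega) (by rw [hAlen]; omega)]
      rw [(by rw [hAlen] : pvNIdx (pvPlan robots w h).length (r+i) = pvNIdx h.toNat (r+i))]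
      rw [pvNIdx_nonneg_cast _ _ hri.1]
      have hrowmem : (pvPlan robots w h).getD (r+i).toNat [] ∈ pvPlan robots w h := by
        rw [List.getD_eq_getElem?_getD, List.getElem?_eq_getElem (by rw [hAlen]; omega)]
        exact List.getElem_mem _
      have hrowlen : ((pvPlan robots w h).getD (r+i).toNat []).length = w.toNat := hArow _ hrowmem
      rw [pvGetD_eq _ (c+j) 0 (by rw [hrowlen]; omega) (by rw [hrowlen]; omega)]
      rw [(by rw [hrowlen] : pvNIdx ((pvPlan robots w h).getD (r+i).toNat []).length (c+j) = pvNIdx w.toNat (c+j))]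
      rw [pvNIdx_nonneg_cast _ _ hcj.1]
      rw [hAcell (r+i).toNat (c+j).toNat (by omega) (by omega)]
      rw [pvPlan0_cell]
      rw [Int.toNat_of_nonneg hri.1, Int.toNat_of_nonneg hcj.1]
      unfold pvInd
      by_cases hmem : (c+j, r+i) ∈ pvMods robots w h
      · rw [if_pos (by have := List.count_pos_iff.mpr hmem; omega), if_pos hmem]
      · rw [if_neg (by rw [List.count_eq_zero.mpr hmem]; omega), if_neg hmem]
    have hmapA : ([0,1,2,3,4] : List Int).map (fun i =>
          (([0,1,2,3,4] : List Int).map (fun j =>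
            if PySem.List.pyGetD (PySem.List.pyGetD (pvPlan robots w h) (r+i) []) (c+j) 0 ≥ 1 then (1:Int) else 0)).sum)
        = ([0,1,2,3,4] : List Int).map (fun i =>
          (([0,1,2,3,4] : List Int).map (fun j => pvInd robots w h (c+j) (r+i))).sum) :=
      List.map_congr_left (fun i hi => congrArg List.sum (List.map_congr_left (fun j hj => hterm i hi j hj)))
    rw [hmapA]
    -- B value
    have hPv : ∀ (x y : Int), 0 ≤ x → x ≤ h → 0 ≤ y → y ≤ w →
        PySem.List.pyGetD (PySem.List.pyGetD (pvP robots w h) x []) y 0 = pvS robots w h x.toNat y.toNat := by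
      intro x y hx0 hxh hy0 hyw
      rw [pvGetD_eq (pvP robots w h) x [] (by rw [hPlen]; omega) (by rw [hPlen]; omega)]
      rw [(by rw [hPlen] : pvNIdx (pvP robots w h).length x = pvNIdx (h.toNat + 1) x)]
      rw [pvNIdx_nonneg_cast _ _ hx0]
      have hrowmem : (pvP robots w h).getD x.toNat [] ∈ pvP robots w h := by
        rw [List.getD_eq_getElem?_getD, List.getElem?_eq_getElem (by rw [hPlen]; omega)]
        exact List.getElem_mem _
      have hrowlen : ((pvP robots w h).getD x.toNat []).length = w.toNat + 1 := hProw _ hrowmem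
      rw [pvGetD_eq _ y 0 (by rw [hrowlen]; omega) (by rw [hrowlen]; omega)]
      rw [(by rw [hrowlen] : pvNIdx ((pvP robots w h).getD x.toNat []).length y = pvNIdx (w.toNat + 1) y)]
      rw [pvNIdx_nonneg_cast _ _ hy0]
      exact hPcell x.toNat y.toNat (by omega) (by omega)
    rw [hPv (r+5) (c+5) (by omega) (by omega) (by omega) (by omega),
      hPv r (c+5) (by omega) (by omega) (by omega) (by omega),
      hPv (r+5) c (by omega) (by omega) (by omega) (by omega),
      hPv r c (by omega) (by omega) (by omega) (by omega)]
    rw [(by omega : (r+5).toNat = r.toNat + 5), (by omega : (c+5).toNat = c.toNat + 5)]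
    rw [pvWindowAlg robots w h r.toNat c.toNat]
    rw [Int.toNat_of_nonneg hr.1, Int.toNat_of_nonneg hc.1]
    rw [zero_add]
    show (pvWin robots w h r c == 25) = (pvWin robots w h r c == 25)
    rfl
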